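-- pv_equiv track=rewrite | github.com/neumann-mlucas/rosalind | src/rosalind_lcsm.py | get_identity_matrix
-- ===== SOURCE A (Python) =====
-- def get_identity_matrix(seq1, seq2):
--     # m columns, n lines
--     m, n = len(seq1), len(seq2)
--     # Create identity matrix
--     matrix = [[int(i == j) for j in seq2] for i in seq1]
--     # Add values in diagonals
--     for i in range(1, m):
--         for j in range(1, n):
--             matrix[i][j] = (
--                 matrix[i][j] + matrix[i - 1][j - 1] if matrix[i][j] == 1 else 0
--             )
--     return matrix
-- ===== SOURCE B (Python) =====
-- def get_identity_matrix(seq1, seq2):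
--     # Memoryless per-cell computation: cell (i, j) is the length of the run of
--     # matching characters walking backwards from (i, j); no matrix recurrence,
--     # no previous row/diagonal is consulted.
--     def suffix_len(i, j):
--         k = 0
--         while k <= min(i, j) and seq1[i - k] == seq2[j - k]:
--             k += 1
--         return k
--
--     return [[suffix_len(i, j) for j in range(len(seq2))] for i in range(len(seq1))]
-- ===== Notes on version B (the rewrite author's own statement) =====
-- stated objective: alternative
-- what changed: Replaces A's dynamic program (build an identity matrix, then patch each cell in place from matrix[i-1][j-1]) by a memoryless per-cell computation: each entry is obtained independently by walking backwards from (i,j) and counting the run of matching characters, so no matrix recurrence or previous row is consulted.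
import Mathlib
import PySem

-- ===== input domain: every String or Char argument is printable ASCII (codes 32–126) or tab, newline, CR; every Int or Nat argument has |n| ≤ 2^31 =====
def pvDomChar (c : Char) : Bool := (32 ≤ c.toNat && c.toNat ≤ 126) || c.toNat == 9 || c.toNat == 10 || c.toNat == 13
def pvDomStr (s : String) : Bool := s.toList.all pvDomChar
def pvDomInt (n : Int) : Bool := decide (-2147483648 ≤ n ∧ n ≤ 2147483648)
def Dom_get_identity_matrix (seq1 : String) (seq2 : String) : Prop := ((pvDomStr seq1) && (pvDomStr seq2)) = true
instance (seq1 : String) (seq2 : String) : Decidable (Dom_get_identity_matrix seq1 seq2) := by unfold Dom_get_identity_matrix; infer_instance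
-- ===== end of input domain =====

-- B replaces A's dynamic program (build identity matrix, patch cells from matrix[i-1][j-1])
-- by a memoryless per-cell computation: each entry counts backwards the run of matching
-- characters from (i, j), consulting no other matrix cell (objective: alternative).

-- ===== PORT A =====
-- int(i == j)
def pvInd (c1 c2 : Char) : Int := if c1 = c2 then 1 else 0

-- matrix[i][j]; the loops only read in-range nonnegative indices, so getD is exact here
def pvAGet (mat : List (List Int)) (i j : Nat) : Int := (mat.getD i []).getD j 0

-- matrix[i][j] = v; likewise only used at in-range nonnegative indices
def pvASet (mat : List (List Int)) (i j : Nat) (v : Int) : List (List Int) :=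
  mat.modify i (fun row => row.set j v)

-- body of the inner 'for j' loop
def pvAStepJ (i : Int) (mat : List (List Int)) (j : Int) : List (List Int) :=
  let v := pvAGet mat i.toNat j.toNat
  pvASet mat i.toNat j.toNat
    (if v = 1 then v + pvAGet mat (i.toNat - 1) (j.toNat - 1) else 0)

-- body of the outer 'for i' loop
def pvAStepI (n : Nat) (mat : List (List Int)) (i : Int) : List (List Int) :=
  (PySem.List.pyRange 1 n 1).foldl (pvAStepJ i) mat

def get_identity_matrix (seq1 : String) (seq2 : String) : List (List Int) :=
  let s1 := seq1.toList
  let s2 := seq2.toList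
  let matrix := s1.map (fun c1 => s2.map (fun c2 => pvInd c1 c2))
  (PySem.List.pyRange 1 s1.length 1).foldl (pvAStepI s2.length) matrix

-- ===== PORT B =====
-- Source B's while loop of suffix_len; the guard k ≤ min i j keeps both indices
-- in range (and nonnegative), so getD is exact for Python's seq[i-k]
def pvSufGo (s1 s2 : List Char) (i j k : Nat) : Nat :=
  if k ≤ min i j ∧ s1.getD (i - k) 'a' = s2.getD (j - k) 'a'
  then pvSufGo s1 s2 i j (k + 1)
  else k
termination_by min i j + 1 - k
decreasing_by rename_i h; omega

-- suffix_len(i, j)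
def pvSufLen (s1 s2 : List Char) (i j : Nat) : Int := (pvSufGo s1 s2 i j 0 : Int)

def get_identity_matrix_alt (seq1 : String) (seq2 : String) : List (List Int) :=
  let s1 := seq1.toList
  let s2 := seq2.toList
  (List.range s1.length).map (fun i => (List.range s2.length).map (fun j => pvSufLen s1 s2 i j))

-- ===== PRECONDITION & SPEC =====
def Spec_get_identity_matrix (seq1 : String) (seq2 : String) (out : List (List Int)) : Prop := out = get_identity_matrix_alt seq1 seq2
instance (seq1 : String) (seq2 : String) (out : List (List Int)) : Decidable (Spec_get_identity_matrix seq1 seq2 out) := by unfold Spec_get_identity_matrix; infer_instance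

-- ===== CLAIM (what is proved, stated in full; the proofs are below) =====
def Claim_equal_get_identity_matrix : Prop := ∀ (seq1 : String) (seq2 : String), Dom_get_identity_matrix seq1 seq2 → Spec_get_identity_matrix seq1 seq2 (get_identity_matrix seq1 seq2)

-- ===== LEMMAS AND PROOFS =====

-- reference value of cell (i, j): common-suffix length ending at (i, j) if the chars match, else 0
def pvG (s1 s2 : List Char) : Nat → Nat → Int
  | 0, j => pvInd (s1.getD 0 'a') (s2.getD j 'a')
  | i+1, 0 => pvInd (s1.getD (i+1) 'a') (s2.getD 0 'a')
  | i+1, j+1 =>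
      if pvInd (s1.getD (i+1) 'a') (s2.getD (j+1) 'a') = 1 then pvG s1 s2 i j + 1 else 0

def pvRowG (s1 s2 : List Char) (i : Nat) : List Int := (List.range s2.length).map (pvG s1 s2 i)

def pvMatG (s1 s2 : List Char) : List (List Int) := (List.range s1.length).map (pvRowG s1 s2)

lemma pvG_zero (s1 s2 : List Char) (i : Nat) :
    pvG s1 s2 i 0 = pvInd (s1.getD i 'a') (s2.getD 0 'a') := by
  cases i <;> rfl

lemma pvInd_eq_one_iff (c1 c2 : Char) : pvInd c1 c2 = 1 ↔ c1 = c2 := by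
  unfold pvInd; split <;> simp_all

-- ----- B side -----

-- shifting both positions up by one shifts the counter by one
lemma pvSufGo_shift (s1 s2 : List Char) (i j : Nat) :
    ∀ (d k : Nat), min i j + 1 - k ≤ d →
      pvSufGo s1 s2 (i+1) (j+1) (k+1) = pvSufGo s1 s2 i j k + 1 := by
  intro d
  induction d with
  | zero =>
      intro k hk
      conv_lhs => rw [pvSufGo]
      conv_rhs => rw [pvSufGo]
      rw [if_neg (by rintro ⟨h, -⟩; omega), if_neg (by rintro ⟨h, -⟩; omega)]
  | succ d ih =>
      intro k hk
      conv_lhs => rw [pvSufGo]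
      simp only [show i + 1 - (k + 1) = i - k from by omega,
                 show j + 1 - (k + 1) = j - k from by omega]
      by_cases hg : k ≤ min i j ∧ s1.getD (i - k) 'a' = s2.getD (j - k) 'a'
      · rw [if_pos ⟨by omega, hg.2⟩, ih (k+1) (by omega)]
        conv_rhs => rw [pvSufGo]
        rw [if_pos hg]
      · rw [if_neg (by rintro ⟨h1, h2⟩; exact hg ⟨by omega, h2⟩)]
        conv_rhs => rw [pvSufGo]
        rw [if_neg hg]

-- suffix_len computes exactly A's DP value
lemma pvSufLen_eq_pvG (s1 s2 : List Char) :
    ∀ (i j : Nat), pvSufLen s1 s2 i j = pvG s1 s2 i j := by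
  intro i
  induction i with
  | zero =>
      intro j
      unfold pvSufLen
      conv_lhs => rw [pvSufGo]
      simp only [Nat.sub_zero]
      by_cases hm : s1.getD 0 'a' = s2.getD j 'a'
      · rw [if_pos ⟨Nat.zero_le _, hm⟩]
        conv_lhs => rw [pvSufGo]
        rw [if_neg (by rintro ⟨h, -⟩; omega)]
        rw [pvG]
        simp only [pvInd, if_pos hm]
        norm_num
      · rw [if_neg (by rintro ⟨-, h⟩; exact hm h)]
        rw [pvG]
        simp only [pvInd, if_neg hm]
        norm_num
  | succ i' ih =>
      intro j
      cases j with
      | zero =>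
          unfold pvSufLen
          conv_lhs => rw [pvSufGo]
          simp only [Nat.sub_zero]
          by_cases hm : s1.getD (i'+1) 'a' = s2.getD 0 'a'
          · rw [if_pos ⟨Nat.zero_le _, hm⟩]
            conv_lhs => rw [pvSufGo]
            rw [if_neg (by rintro ⟨h, -⟩; omega)]
            rw [pvG]
            simp only [pvInd, if_pos hm]
            norm_num
          · rw [if_neg (by rintro ⟨-, h⟩; exact hm h)]
            rw [pvG]
            simp only [pvInd, if_neg hm]
            norm_num
      | succ j' =>
          unfold pvSufLen
          conv_lhs => rw [pvSufGo]
          simp only [Nat.sub_zero]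
          by_cases hm : s1.getD (i'+1) 'a' = s2.getD (j'+1) 'a'
          · rw [if_pos ⟨Nat.zero_le _, hm⟩,
               pvSufGo_shift s1 s2 i' j' (min i' j' + 1) 0 le_rfl]
            rw [pvG, if_pos ((pvInd_eq_one_iff _ _).mpr hm)]
            push_cast
            rw [show ((pvSufGo s1 s2 i' j' 0 : Int)) = pvSufLen s1 s2 i' j' from rfl,
                ih j']
          · rw [if_neg (by rintro ⟨-, h⟩; exact hm h)]
            rw [pvG, if_neg (by rw [pvInd_eq_one_iff]; exact hm)]
            norm_num

lemma pvB_eq_matG (seq1 seq2 : String) :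
    get_identity_matrix_alt seq1 seq2 = pvMatG seq1.toList seq2.toList := by
  unfold get_identity_matrix_alt pvMatG pvRowG
  apply List.map_congr_left
  intro i _
  apply List.map_congr_left
  intro j _
  exact pvSufLen_eq_pvG seq1.toList seq2.toList i j

-- ----- A side -----

-- row i of the freshly built identity matrix
def pvRowI (s1 s2 : List Char) (i : Nat) : List Int :=
  (List.range s2.length).map (fun j => pvInd (s1.getD i 'a') (s2.getD j 'a'))

-- row i mid-inner-loop: columns ≤ j0 already rewritten, later columns still initial
def pvRowM (s1 s2 : List Char) (i j0 : Nat) : List Int :=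
  (List.range s2.length).map
    (fun j => if j ≤ j0 then pvG s1 s2 i j else pvInd (s1.getD i 'a') (s2.getD j 'a'))

-- matrix between outer iterations: rows ≤ i0 done, later rows still initial
def pvStateS (s1 s2 : List Char) (i0 : Nat) : List (List Int) :=
  (List.range s1.length).map (fun r => if r ≤ i0 then pvRowG s1 s2 r else pvRowI s1 s2 r)

-- matrix mid-inner-loop at row i
def pvStateM (s1 s2 : List Char) (i j0 : Nat) : List (List Int) :=
  (List.range s1.length).map
    (fun r => if r < i then pvRowG s1 s2 r else
              if r = i then pvRowM s1 s2 i j0 else pvRowI s1 s2 r)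

lemma pvRowG_zero_eq_rowI (s1 s2 : List Char) : pvRowG s1 s2 0 = pvRowI s1 s2 0 := rfl

lemma pvInit_eq_stateS (s1 s2 : List Char) :
    s1.map (fun c1 => s2.map (fun c2 => pvInd c1 c2)) = pvStateS s1 s2 0 := by
  apply List.ext_getElem
  · simp [pvStateS]
  · intro r h1 h2
    simp only [pvStateS, List.getElem_map, List.getElem_range]
    have hr : r < s1.length := by simpa using h1
    rw [show (if r ≤ 0 then pvRowG s1 s2 r else pvRowI s1 s2 r)
        = pvRowI s1 s2 r from by
      rcases Nat.eq_zero_or_pos r with h | h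
      · subst h; simp [pvRowG_zero_eq_rowI]
      · rw [if_neg (show ¬ r ≤ 0 by omega)]]
    apply List.ext_getElem
    · simp [pvRowI]
    · intro j hj1 hj2
      simp only [pvRowI, List.getElem_map, List.getElem_range]
      rw [List.getD_eq_getElem _ _ hr, List.getD_eq_getElem _ _ (by simpa using hj1)]

lemma pvStateM_zero (s1 s2 : List Char) (i : Nat) (hi : 1 ≤ i) :
    pvStateM s1 s2 i 0 = pvStateS s1 s2 (i-1) := by
  have hM0 : pvRowM s1 s2 i 0 = pvRowI s1 s2 i := by
    unfold pvRowM pvRowI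
    apply List.map_congr_left
    intro j _
    by_cases hj : j ≤ 0
    · have hj0 : j = 0 := by omega
      subst hj0
      rw [if_pos le_rfl, pvG_zero]
    · rw [if_neg hj]
  unfold pvStateM pvStateS
  apply List.map_congr_left
  intro r _
  by_cases h1 : r < i
  · rw [if_pos h1, if_pos (show r ≤ i - 1 by omega)]
  · rw [if_neg h1, if_neg (show ¬ r ≤ i - 1 by omega)]
    by_cases h2 : r = i
    · rw [if_pos h2]
      subst h2
      exact hM0
    · rw [if_neg h2]

lemma pvStateM_full (s1 s2 : List Char) (i : Nat) :
    pvStateM s1 s2 i (s2.length - 1) = pvStateS s1 s2 i := by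
  have hMfull : pvRowM s1 s2 i (s2.length - 1) = pvRowG s1 s2 i := by
    unfold pvRowM pvRowG
    apply List.map_congr_left
    intro j hj
    rw [if_pos (show j ≤ s2.length - 1 by have := List.mem_range.mp hj; omega)]
  unfold pvStateM pvStateS
  apply List.map_congr_left
  intro r _
  by_cases h1 : r < i
  · rw [if_pos h1, if_pos (show r ≤ i by omega)]
  · rw [if_neg h1]
    by_cases h2 : r = i
    · rw [if_pos h2, if_pos (show r ≤ i by omega)]
      subst h2
      exact hMfull
    · rw [if_neg h2, if_neg (show ¬ r ≤ i by omega)]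

-- the inner-loop step rewrites exactly column j of row i
lemma pvAStepJ_eq (s1 s2 : List Char) (i j : Nat)
    (hi1 : 1 ≤ i) (hi2 : i < s1.length) (hj1 : 1 ≤ j) (hj2 : j < s2.length) :
    pvAStepJ (i : Int) (pvStateM s1 s2 i (j-1)) (j : Int) = pvStateM s1 s2 i j := by
  unfold pvAStepJ pvASet pvAGet
  simp only [Int.toNat_natCast]
  have hrowi : (pvStateM s1 s2 i (j-1)).getD i [] = pvRowM s1 s2 i (j-1) := by
    unfold pvStateM
    rw [List.getD_eq_getElem _ _ (by simpa using hi2)]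
    simp
  have hrowi1 : (pvStateM s1 s2 i (j-1)).getD (i-1) [] = pvRowG s1 s2 (i-1) := by
    unfold pvStateM
    rw [List.getD_eq_getElem _ _ (by simp; omega)]
    simp only [List.getElem_map, List.getElem_range]
    rw [if_pos (by omega)]
  have hv : (pvRowM s1 s2 i (j-1)).getD j 0
      = pvInd (s1.getD i 'a') (s2.getD j 'a') := by
    unfold pvRowM
    rw [List.getD_eq_getElem _ _ (by simpa using hj2)]
    simp only [List.getElem_map, List.getElem_range]
    rw [if_neg (by omega)]
  have hd : (pvRowG s1 s2 (i-1)).getD (j-1) 0 = pvG s1 s2 (i-1) (j-1) := by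
    unfold pvRowG
    rw [List.getD_eq_getElem _ _ (by simp; omega)]
    simp
  rw [hrowi, hrowi1, hv, hd]
  -- the written value is pvG i j
  have hval : (if pvInd (s1.getD i 'a') (s2.getD j 'a') = 1
      then pvInd (s1.getD i 'a') (s2.getD j 'a') + pvG s1 s2 (i-1) (j-1) else 0)
      = pvG s1 s2 i j := by
    obtain ⟨i', rfl⟩ : ∃ i', i = i' + 1 := ⟨i - 1, by omega⟩
    obtain ⟨j', rfl⟩ : ∃ j', j = j' + 1 := ⟨j - 1, by omega⟩
    simp only [pvG, Nat.add_sub_cancel]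
    split
    · rename_i h; rw [h]; ring
    · rfl
  rw [hval]
  -- and the modify/set turns state (j-1) into state j
  have hrowset : (pvRowM s1 s2 i (j-1)).set j (pvG s1 s2 i j) = pvRowM s1 s2 i j := by
    apply List.ext_getElem
    · simp [pvRowM]
    · intro jj hh1 hh2
      have hjj : jj < s2.length := by simpa [pvRowM] using hh2
      rw [List.getElem_set]
      simp only [pvRowM, List.getElem_map, List.getElem_range]
      by_cases hjje : j = jj
      · rw [if_pos hjje, if_pos (show jj ≤ j by omega)]
        subst hjje
        rfl
      · rw [if_neg hjje]
        by_cases hle : jj ≤ j - 1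
        · rw [if_pos hle, if_pos (show jj ≤ j by omega)]
        · rw [if_neg hle, if_neg (show ¬ jj ≤ j by omega)]
  apply List.ext_getElem
  · simp [pvStateM, List.length_modify]
  · intro r h1 h2
    have hr : r < s1.length := by simpa [List.length_modify, pvStateM] using h1
    rw [List.getElem_modify]
    simp only [pvStateM, List.getElem_map, List.getElem_range]
    by_cases hri : i = r
    · rw [if_pos hri]
      rw [if_neg (show ¬ r < i by omega), if_neg (show ¬ r < i by omega),
          if_pos hri.symm, if_pos hri.symm]
      subst hri
      exact hrowset
    · rw [if_neg hri]
      by_cases hlt : r < i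
      · rw [if_pos hlt, if_pos hlt]
      · rw [if_neg hlt, if_neg hlt, if_neg (show ¬ r = i by omega),
            if_neg (show ¬ r = i by omega)]

-- the inner loop from column a onwards
lemma pvA_inner (s1 s2 : List Char) (i : Nat) (hi1 : 1 ≤ i) (hi2 : i < s1.length) :
    ∀ (fuel a : Nat), 1 ≤ a → a + fuel = s2.length →
      (PySem.List.pyRange (a : Int) s2.length 1).foldl (pvAStepJ (i : Int))
        (pvStateM s1 s2 i (a-1)) = pvStateM s1 s2 i (s2.length - 1) := by
  intro fuel
  induction fuel with
  | zero =>
      intro a ha1 ha2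
      rw [PySem.List.pyRange_one_eq_nil (by omega)]
      simp only [List.foldl_nil]
      congr 1
      omega
  | succ f ihf =>
      intro a ha1 ha2
      rw [PySem.List.pyRange_one_cons (by exact_mod_cast (by omega : a < s2.length))]
      rw [List.foldl_cons]
      rw [pvAStepJ_eq s1 s2 i a hi1 hi2 ha1 (by omega)]
      have hcast : ((a : Int) + 1) = ((a + 1 : Nat) : Int) := by push_cast; ring
      rw [hcast]
      have := ihf (a+1) (by omega) (by omega)
      rw [show a + 1 - 1 = a from rfl] at this
      exact this

-- one outer iteration
lemma pvAStepI_eq (s1 s2 : List Char) (i : Nat) (hi1 : 1 ≤ i) (hi2 : i < s1.length) :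
    pvAStepI s2.length (pvStateS s1 s2 (i-1)) (i : Int) = pvStateS s1 s2 i := by
  unfold pvAStepI
  rcases Nat.eq_zero_or_pos s2.length with hn | hn
  · rw [hn]
    rw [PySem.List.pyRange_one_eq_nil (by norm_num)]
    simp only [List.foldl_nil]
    unfold pvStateS
    apply List.map_congr_left
    intro r _
    have hrows : ∀ r' : Nat, pvRowG s1 s2 r' = pvRowI s1 s2 r' := by
      intro r'; unfold pvRowG pvRowI; rw [hn]; simp
    by_cases h1 : r ≤ i - 1 <;> by_cases h2 : r ≤ i <;> simp [h1, h2, hrows]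
  · rw [← pvStateM_zero s1 s2 i hi1]
    have := pvA_inner s1 s2 i hi1 hi2 (s2.length - 1) 1 le_rfl (by omega)
    rw [show (1 : Nat) - 1 = 0 from rfl] at this
    rw [show ((1 : Nat) : Int) = (1 : Int) from rfl] at this
    rw [this]
    exact pvStateM_full s1 s2 i

-- the outer loop from row a onwards
lemma pvA_outer (s1 s2 : List Char) :
    ∀ (fuel a : Nat), 1 ≤ a → a + fuel = s1.length →
      (PySem.List.pyRange (a : Int) s1.length 1).foldl (pvAStepI s2.length)
        (pvStateS s1 s2 (a-1)) = pvStateS s1 s2 (s1.length - 1) := by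
  intro fuel
  induction fuel with
  | zero =>
      intro a ha1 ha2
      rw [PySem.List.pyRange_one_eq_nil (by omega)]
      simp only [List.foldl_nil]
      congr 1
      omega
  | succ f ihf =>
      intro a ha1 ha2
      rw [PySem.List.pyRange_one_cons (by exact_mod_cast (by omega : a < s1.length))]
      rw [List.foldl_cons]
      rw [pvAStepI_eq s1 s2 a ha1 (by omega)]
      have hcast : ((a : Int) + 1) = ((a + 1 : Nat) : Int) := by push_cast; ring
      rw [hcast]
      have := ihf (a+1) (by omega) (by omega)
      rw [show a + 1 - 1 = a from rfl] at this
      exact this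

lemma pvStateS_last (s1 s2 : List Char) :
    pvStateS s1 s2 (s1.length - 1) = pvMatG s1 s2 := by
  unfold pvStateS pvMatG
  apply List.map_congr_left
  intro r hr
  rw [if_pos (by have := List.mem_range.mp hr; omega)]

lemma pvA_eq_matG (seq1 seq2 : String) :
    get_identity_matrix seq1 seq2 = pvMatG seq1.toList seq2.toList := by
  simp only [get_identity_matrix]
  rw [pvInit_eq_stateS seq1.toList seq2.toList]
  rcases Nat.eq_zero_or_pos seq1.toList.length with hm | hm
  · rw [PySem.List.pyRange_one_eq_nil (by rw [hm]; norm_num)]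
    simp only [List.foldl_nil]
    rw [← pvStateS_last seq1.toList seq2.toList, hm]
  · have := pvA_outer seq1.toList seq2.toList (seq1.toList.length - 1) 1 le_rfl (by omega)
    rw [show (1 : Nat) - 1 = 0 from rfl] at this
    rw [show ((1 : Nat) : Int) = (1 : Int) from rfl] at this
    rw [this]
    exact pvStateS_last seq1.toList seq2.toList

-- ===== VERDICT (by name: the statement is the Claim_ definition above) =====
theorem get_identity_matrix_spec : Claim_equal_get_identity_matrix := by
  intro seq1 seq2 _
  unfold Spec_get_identity_matrix
  rw [pvA_eq_matG, pvB_eq_matG]
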